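-- pv_equiv track=rewrite | github.com/king-tomi/python-learning | file.py | return_even
-- ===== SOURCE A (Python) =====
-- def return_even(items):
--     result = []
--     for i in items:
--         if i % 2 == 0:
--             result.append(i)
--         else:
--             continue
--     return sorted(result)
-- ===== SOURCE B (Python) =====
-- import bisect
--
-- def return_even(items):
--     result = []
--     for i in items:
--         if i % 2 == 0:
--             bisect.insort(result, i)
--     return result
-- ===== Notes on version B (the rewrite author's own statement) =====
-- stated objective: alternative
-- what changed: Instead of collecting evens into a list and sorting at the end, B maintains an always-sorted result by binary insertion (bisect.insort) of each even element as it is encountered.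
import Mathlib
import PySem

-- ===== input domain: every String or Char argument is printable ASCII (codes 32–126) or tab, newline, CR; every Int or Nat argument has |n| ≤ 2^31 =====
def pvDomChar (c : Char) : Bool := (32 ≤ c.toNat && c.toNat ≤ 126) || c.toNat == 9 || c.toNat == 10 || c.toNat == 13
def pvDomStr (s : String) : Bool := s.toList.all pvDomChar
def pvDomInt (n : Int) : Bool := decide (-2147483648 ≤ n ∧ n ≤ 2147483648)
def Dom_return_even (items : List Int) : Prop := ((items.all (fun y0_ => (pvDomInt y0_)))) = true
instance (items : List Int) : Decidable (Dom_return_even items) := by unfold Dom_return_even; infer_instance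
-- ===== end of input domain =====

-- B replaces collect-then-sort with maintaining a sorted list via binary insertion (bisect.insort); return value only, no mutation observable.

-- ===== PORT A =====
-- result = []; for i in items: if i % 2 == 0: result.append(i); return sorted(result)
def return_even (items : List Int) : List Int :=
  let result := items.foldl (fun acc i => if PySem.Int.mod i 2 = 0 then acc ++ [i] else acc) []
  PySem.List.sorted result (fun x => x)

-- ===== PORT B =====
-- result = []; for i in items: if i % 2 == 0: bisect.insort(result, i); return result
-- bisect.insort on an Int list = PySem.List.insertBy with the strict < test (right insertion among equals)
def return_even_alt (items : List Int) : List Int :=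
  items.foldl (fun acc i =>
    if PySem.Int.mod i 2 = 0 then PySem.List.insertBy (fun a b => decide (a < b)) i acc else acc) []

-- ===== PRECONDITION & SPEC =====
def Spec_return_even (items : List Int) (out : List Int) : Prop := out = return_even_alt items
instance (items : List Int) (out : List Int) : Decidable (Spec_return_even items out) := by unfold Spec_return_even; infer_instance

-- ===== CLAIM (what is proved, stated in full; the proofs are below) =====
def Claim_equal_return_even : Prop := ∀ (items : List Int), Dom_return_even items → Spec_return_even items (return_even items)

-- ===== LEMMAS AND PROOFS =====

-- a conditional fold equals the unconditional fold over the filtered list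
theorem foldl_if_eq_foldl_filter {α β : Type} (p : α → Prop) [DecidablePred p] (f : β → α → β)
    (items : List α) (acc : β) :
    items.foldl (fun acc i => if p i then f acc i else acc) acc
      = (items.filter (fun i => decide (p i))).foldl f acc := by
  induction items generalizing acc with
  | nil => rfl
  | cons x xs ih =>
    simp only [List.foldl_cons, List.filter_cons]
    by_cases h : p x <;> simp [h, ih]

-- appending each element in turn rebuilds the list
theorem foldl_append_id {α : Type} (l : List α) (acc : List α) :
    l.foldl (fun acc i => acc ++ [i]) acc = acc ++ l := by
  induction l generalizing acc with
  | nil => simp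
  | cons x xs ih => simp [ih]

-- ===== VERDICT (by name: the statement is the Claim_ definition above) =====
theorem return_even_spec : Claim_equal_return_even := by
  intro items _
  unfold Spec_return_even return_even return_even_alt
  rw [foldl_if_eq_foldl_filter (fun i => PySem.Int.mod i 2 = 0),
      foldl_if_eq_foldl_filter (fun i => PySem.Int.mod i 2 = 0),
      PySem.List.sorted_eq_foldl_insertBy, foldl_append_id]
  simp
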